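-- pv_equiv track=rewrite | github.com/krzmknt/procon | src/segment_tree/main.py | _nodes_to_be_propagated
-- ===== SOURCE A (Python) =====
-- class Node:
--     def __init__(self, pos: int) -> None:
--         self.pos = pos
--
--     def parent_pos(self) -> int:
--         return self.pos >> 1
--
--     def left_child_pos(self) -> int:
--         return self.pos << 1
--
--     def right_child_pos(self) -> int:
--         return self.pos << 1 | 1
--
--     def is_left_child(self) -> bool:
--         # even
--         return self.pos & 1 == 0
--
--     def is_right_child(self) -> bool:
--         # odd
--         return self.pos & 1 == 1
--
-- def _nodes_to_be_propagated(l_node_pos: int, r_node_pos: int):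
--     """
--     For query [l, r), return node indices that are propagated from the leaf to the root.
--
--     Parameters:
--     l_node_pos : 1-indexed
--     r_node_pos : 1-indexed
--     """
--     l_node_pos = (l_node_pos // (l_node_pos & -l_node_pos)) >> 1
--     r_node_pos = (r_node_pos // (r_node_pos & -r_node_pos)) >> 1
--
--     while l_node_pos != r_node_pos:
--         if r_node_pos < l_node_pos:
--             yield l_node_pos
--             l_node_pos = Node(l_node_pos).parent_pos()
--         else:
--             yield r_node_pos
--             r_node_pos = Node(r_node_pos).parent_pos()
--
--     while 1 <= l_node_pos:
--         yield l_node_pos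
--         l_node_pos = Node(l_node_pos).parent_pos()
-- ===== SOURCE B (Python) =====
-- def _nodes_to_be_propagated(l_node_pos: int, r_node_pos: int):
--     """Materialise the two root-ward paths, then merge them descending with dedup."""
--     l_node_pos = (l_node_pos // (l_node_pos & -l_node_pos)) >> 1
--     r_node_pos = (r_node_pos // (r_node_pos & -r_node_pos)) >> 1
--
--     def chain(x):
--         out = []
--         while 1 <= x:
--             out.append(x)
--             x >>= 1
--         return out
--
--     a = chain(l_node_pos)
--     b = chain(r_node_pos)
--     i = j = 0
--     while i < len(a) and j < len(b):
--         if a[i] > b[j]: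
--             yield a[i]
--             i += 1
--         elif b[j] > a[i]:
--             yield b[j]
--             j += 1
--         else:
--             yield a[i]
--             i += 1
--             j += 1
--     yield from a[i:]
--     yield from b[j:]
-- ===== Notes on version B (the rewrite author's own statement) =====
-- stated objective: alternative
-- what changed: Replaces A's interleaved two-pointer climb (advance the larger position, then emit the common tail) by materialising each root-ward ancestor chain separately and merging the two descending chains with deduplication.
-- outside the precondition, e.g. on _nodes_to_be_propagated(0, 3): A raises ZeroDivisionError, B raises ZeroDivisionError; on _nodes_to_be_propagated(-4, -7): A does not finish within the time limit, B returns []; on _nodes_to_be_propagated(-2, -2): A returns [], B returns []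
import Mathlib
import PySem

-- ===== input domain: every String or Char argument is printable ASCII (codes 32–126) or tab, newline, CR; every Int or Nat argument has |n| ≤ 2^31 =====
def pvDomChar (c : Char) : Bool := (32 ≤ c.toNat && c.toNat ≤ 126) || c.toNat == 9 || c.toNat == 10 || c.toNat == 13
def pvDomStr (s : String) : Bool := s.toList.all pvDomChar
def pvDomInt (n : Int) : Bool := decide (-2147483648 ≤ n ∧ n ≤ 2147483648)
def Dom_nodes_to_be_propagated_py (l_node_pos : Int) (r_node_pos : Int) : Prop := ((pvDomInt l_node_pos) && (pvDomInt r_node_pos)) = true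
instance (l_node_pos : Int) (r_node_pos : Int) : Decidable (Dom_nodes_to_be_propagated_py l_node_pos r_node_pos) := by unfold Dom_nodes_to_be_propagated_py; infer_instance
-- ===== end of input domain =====

-- B replaces A's interleaved two-pointer climb by "materialise both ancestor chains, then merge
-- the two descending chains with dedup" — an alternative decomposition, same cost.
-- Both Pythons are generators; equivalence is about the yielded sequence (as a list).

-- ===== PORT A =====
-- second while loop of A: 'while 1 <= l: yield l; l = l >> 1'
def pvA_climb (l : Int) : List Int :=
  if 1 ≤ l then l :: pvA_climb (l >>> (1:Nat)) else []
termination_by l.toNat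
decreasing_by simp [Int.shiftRight_eq_div_pow]; omega

-- first while loop of A, made total with fuel (the loop does not terminate on negative
-- positions, which Pre_ excludes; inside Pre_ the fuel passed below is sufficient)
def pvA_loop : Nat → Int → Int → List Int
  | 0, _, _ => []
  | fuel + 1, l, r =>
    if l ≠ r then
      if r < l then l :: pvA_loop fuel (l >>> (1:Nat)) r
      else r :: pvA_loop fuel l (r >>> (1:Nat))
    else pvA_climb l

def nodes_to_be_propagated_py (l_node_pos : Int) (r_node_pos : Int) : List Int :=
  let l := (PySem.Int.floordiv l_node_pos (PySem.Int.band l_node_pos (-l_node_pos))) >>> (1:Nat)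
  let r := (PySem.Int.floordiv r_node_pos (PySem.Int.band r_node_pos (-r_node_pos))) >>> (1:Nat)
  pvA_loop (l.toNat + r.toNat + 1) l r

-- ===== PORT B =====
-- B's chain(x): collect x, x>>1, … while ≥ 1
def pvB_chain (x : Int) : List Int :=
  if 1 ≤ x then x :: pvB_chain (x >>> (1:Nat)) else []
termination_by x.toNat
decreasing_by simp [Int.shiftRight_eq_div_pow]; omega

-- B's index-based merge of the two descending lists, dropping shared elements once
def pvB_merge : List Int → List Int → List Int
  | [], ys => ys
  | x :: xs, [] => x :: xs
  | x :: xs, y :: ys =>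
    if x > y then x :: pvB_merge xs (y :: ys)
    else if y > x then y :: pvB_merge (x :: xs) ys
    else x :: pvB_merge xs ys

def nodes_to_be_propagated_py_alt (l_node_pos : Int) (r_node_pos : Int) : List Int :=
  let l := (PySem.Int.floordiv l_node_pos (PySem.Int.band l_node_pos (-l_node_pos))) >>> (1:Nat)
  let r := (PySem.Int.floordiv r_node_pos (PySem.Int.band r_node_pos (-r_node_pos))) >>> (1:Nat)
  pvB_merge (pvB_chain l) (pvB_chain r)

-- ===== PRECONDITION & SPEC =====
-- Pre_ keeps the natural 1-indexed domain: A raises ZeroDivisionError when an argument is 0,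
-- and on negative arguments A's generator never terminates except on a few accidental pairs
-- (e.g. (-2, -2)) where it happens to yield nothing, which B also does.
def Pre_nodes_to_be_propagated_py (l_node_pos : Int) (r_node_pos : Int) : Prop :=
  1 ≤ l_node_pos ∧ 1 ≤ r_node_pos
instance (l_node_pos : Int) (r_node_pos : Int) : Decidable (Pre_nodes_to_be_propagated_py l_node_pos r_node_pos) := by unfold Pre_nodes_to_be_propagated_py; infer_instance

def pvWitness_nodes_to_be_propagated_py : Int × Int := (5, 12)

def Spec_nodes_to_be_propagated_py (l_node_pos : Int) (r_node_pos : Int) (out : List Int) : Prop := out = nodes_to_be_propagated_py_alt l_node_pos r_node_pos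
instance (l_node_pos : Int) (r_node_pos : Int) (out : List Int) : Decidable (Spec_nodes_to_be_propagated_py l_node_pos r_node_pos out) := by unfold Spec_nodes_to_be_propagated_py; infer_instance

-- ===== CLAIM (what is proved, stated in full; the proofs are below) =====
def Claim_equal_nodes_to_be_propagated_py : Prop := ∀ (l_node_pos : Int) (r_node_pos : Int), Dom_nodes_to_be_propagated_py l_node_pos r_node_pos → Pre_nodes_to_be_propagated_py l_node_pos r_node_pos → Spec_nodes_to_be_propagated_py l_node_pos r_node_pos (nodes_to_be_propagated_py l_node_pos r_node_pos)

-- ===== LEMMAS AND PROOFS =====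

theorem pvB_chain_eq_climb (x : Int) : pvB_chain x = pvA_climb x := by
  rw [pvB_chain, pvA_climb]
  split
  · rw [pvB_chain_eq_climb]
  · rfl
termination_by x.toNat
decreasing_by simp [Int.shiftRight_eq_div_pow]; omega

theorem pvB_merge_nil_right (xs : List Int) : pvB_merge xs [] = xs := by
  cases xs <;> simp [pvB_merge]

theorem pvB_merge_self (xs : List Int) : pvB_merge xs xs = xs := by
  induction xs with
  | nil => simp [pvB_merge]
  | cons a t ih => simp [pvB_merge, ih]


theorem pvB_chain_pos (x : Int) (h : 1 ≤ x) :
    pvB_chain x = x :: pvB_chain (x >>> (1:Nat)) := by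
  rw [pvB_chain]; simp [h]

theorem pvB_chain_nonpos (x : Int) (h : ¬ 1 ≤ x) : pvB_chain x = [] := by
  rw [pvB_chain]; simp [h]

-- merging step: when r < l (both ≥ 0, so l ≥ 1), the merge emits l first
theorem pvB_merge_step (l r : Int) (hr : 0 ≤ r) (hlt : r < l) :
    pvB_merge (pvB_chain l) (pvB_chain r) =
      l :: pvB_merge (pvB_chain (l >>> (1:Nat))) (pvB_chain r) := by
  rw [pvB_chain_pos l (by omega)]
  by_cases h1 : 1 ≤ r
  · conv_lhs => rw [pvB_chain_pos r h1]
    rw [pvB_merge]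
    simp only [if_pos hlt]
    rw [← pvB_chain_pos r h1]
  · rw [pvB_chain_nonpos r h1, pvB_merge_nil_right, pvB_merge_nil_right]

theorem pvB_merge_step_right (l r : Int) (hl : 0 ≤ l) (hlt : l < r) :
    pvB_merge (pvB_chain l) (pvB_chain r) =
      r :: pvB_merge (pvB_chain l) (pvB_chain (r >>> (1:Nat))) := by
  rw [pvB_chain_pos r (by omega)]
  by_cases h1 : 1 ≤ l
  · conv_lhs => rw [pvB_chain_pos l h1]
    rw [pvB_merge]
    simp only [if_neg (by omega : ¬ l > r), if_pos hlt]
    rw [← pvB_chain_pos l h1]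
  · rw [pvB_chain_nonpos l h1]; simp [pvB_merge]

theorem pvHalf_toNat_lt (x : Int) (h : 1 ≤ x) : (x >>> (1:Nat)).toNat < x.toNat := by
  simp [Int.shiftRight_eq_div_pow]; omega

theorem pvHalf_nonneg (x : Int) (h : 0 ≤ x) : 0 ≤ x >>> (1:Nat) := by
  simp [Int.shiftRight_eq_div_pow]; omega

-- the main loop equals the merged chains, given enough fuel and nonnegative positions
theorem pvA_loop_eq_merge (fuel : Nat) (l r : Int) (hl : 0 ≤ l) (hr : 0 ≤ r)
    (hf : l.toNat + r.toNat ≤ fuel) :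
    pvA_loop fuel l r = pvB_merge (pvB_chain l) (pvB_chain r) := by
  induction fuel generalizing l r with
  | zero =>
    have hl0 : l = 0 := by omega
    have hr0 : r = 0 := by omega
    subst hl0; subst hr0
    simp [pvA_loop, pvB_chain_nonpos 0 (by omega), pvB_merge]
  | succ n ih =>
    by_cases hne : l = r
    · subst hne
      simp [pvA_loop, pvB_merge_self, pvB_chain_eq_climb]
    · by_cases hlt : r < l
      · have h1 : 1 ≤ l := by omega
        have := pvHalf_toNat_lt l h1
        rw [pvA_loop]
        simp [hne, hlt]
        rw [ih (l >>> (1:Nat)) r (pvHalf_nonneg l hl) hr (by omega),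
          ← pvB_merge_step l r hr hlt]
      · have hlt' : l < r := by omega
        have h1 : 1 ≤ r := by omega
        have := pvHalf_toNat_lt r h1
        rw [pvA_loop]
        simp [hne, hlt]
        rw [ih l (r >>> (1:Nat)) hl (pvHalf_nonneg r hr) (by omega),
          ← pvB_merge_step_right l r hl hlt']

theorem pvFloordiv_nonneg (a b : Int) (ha : 0 ≤ a) (hb : 0 ≤ b) :
    0 ≤ PySem.Int.floordiv a b := by
  rcases lt_or_eq_of_le hb with hb' | hb'
  · rw [PySem.Int.floordiv_eq_ediv_of_pos hb']
    exact Int.ediv_nonneg ha (le_of_lt hb')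
  · have : b = 0 := hb'.symm
    subst this
    have : PySem.Int.floordiv a 0 = 0 := by
      simp [PySem.Int.floordiv]
    omega

-- ===== VERDICT (by name: the statement is the Claim_ definition above) =====
theorem nodes_to_be_propagated_py_spec : Claim_equal_nodes_to_be_propagated_py := by
  intro l r _ hpre
  obtain ⟨hl, hr⟩ := hpre
  unfold Spec_nodes_to_be_propagated_py nodes_to_be_propagated_py nodes_to_be_propagated_py_alt
  have hbl : 0 ≤ PySem.Int.band l (-l) := PySem.Int.band_nonneg_of_nonneg_left _ (by omega)
  have hbr : 0 ≤ PySem.Int.band r (-r) := PySem.Int.band_nonneg_of_nonneg_left _ (by omega)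
  have hL : 0 ≤ (PySem.Int.floordiv l (PySem.Int.band l (-l))) >>> (1:Nat) :=
    pvHalf_nonneg _ (pvFloordiv_nonneg _ _ (by omega) hbl)
  have hR : 0 ≤ (PySem.Int.floordiv r (PySem.Int.band r (-r))) >>> (1:Nat) :=
    pvHalf_nonneg _ (pvFloordiv_nonneg _ _ (by omega) hbr)
  exact pvA_loop_eq_merge _ _ _ hL hR (by omega)
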